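-- pv_equiv track=rewrite | github.com/nicolas3355/f469-disco | libs/common/embit/shamir_crypto.py | _div_gf2
-- ===== SOURCE A (Python) =====
-- def _mult_gf2(f1, f2):
--     """Multiply two polynomials in GF(2)"""
--
--     # Ensure f2 is the smallest
--     if f2 > f1:
--         f1, f2 = f2, f1
--     z = 0
--     while f2:
--         if f2 & 1:
--             z ^= f1
--         f1 <<= 1
--         f2 >>= 1
--     return z
--
-- def _div_gf2(a, b):
--     """
--     Compute division of polynomials over GF(2).
--     Given a and b, it finds two polynomials q and r such that:
--     a = b*q + r with deg(r)<deg(b)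
--     """
--
--     if (a < b):
--         return 0, a
--
--     def deg(n):
--         if n == 0:
--             return 0
--         else:
--             return len(bin(abs(n))) - 2
--
--     # deg = int.bit_length
--     q = 0
--     r = a
--     d = deg(b)
--     while deg(r) >= d:
--         s = 1 << (deg(r) - d)
--         q ^= s
--         r ^= _mult_gf2(b, s)
--     return (q, r)
-- ===== SOURCE B (Python) =====
-- def _div_gf2(a, b):
--     """
--     GF(2) polynomial division by an MSB-first shift register: the divisor is
--     never shifted; instead the dividend's bits are fed one at a time into a
--     remainder register kept below b.bit_length() bits, reducing by a plain
--     xor with b whenever the register fills up.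
--     """
--     if a < b:
--         return 0, a
--     db = b.bit_length()
--     q = 0
--     r = 0
--     for i in range(a.bit_length() - 1, -1, -1):
--         r = (r << 1) | ((a >> i) & 1)
--         if r.bit_length() >= db:
--             r ^= b
--             q |= 1 << i
--     return q, r
-- ===== Notes on version B (the rewrite author's own statement) =====
-- stated objective: alternative
-- what changed: A repeatedly rescans the remainder's bit length and xors in a shifted copy of b built by a GF(2) multiply helper; B never shifts b: it feeds the dividend's bits MSB-first into a shift register kept below b.bit_length() bits and reduces with a plain unshifted xor of b.
-- outside the precondition, e.g. on _div_gf2(-2, -4): A returns (0, -2), B returns (0, 2)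
import Mathlib
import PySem

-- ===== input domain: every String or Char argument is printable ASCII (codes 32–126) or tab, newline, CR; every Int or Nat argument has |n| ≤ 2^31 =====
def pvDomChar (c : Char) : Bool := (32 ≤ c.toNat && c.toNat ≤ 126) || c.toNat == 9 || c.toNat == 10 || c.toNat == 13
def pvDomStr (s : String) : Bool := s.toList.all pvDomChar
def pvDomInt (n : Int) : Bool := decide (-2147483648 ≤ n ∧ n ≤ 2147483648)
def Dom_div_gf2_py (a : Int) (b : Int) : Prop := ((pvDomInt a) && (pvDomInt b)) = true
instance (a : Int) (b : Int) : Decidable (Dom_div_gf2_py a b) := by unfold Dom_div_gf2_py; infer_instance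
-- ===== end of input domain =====

-- B replaces A's shift-the-divisor long division (bit-length rescan + GF(2) multiply
-- helper per step) by an MSB-first shift register: b is never shifted, the dividend's
-- bits are fed in one at a time and reduced by a plain xor (objective: alternative).

-- ===== PORT A =====
-- while-loop of _mult_gf2 with fuel; fuel f2.natAbs+1 exceeds the iteration count
-- (= bit length of f2) whenever the Python loop terminates on inputs admitted by Pre_.
def multGf2Loop : Nat → Int → Int → Int → Int
  | 0, z, _, _ => z
  | fuel+1, z, f1, f2 =>
    if f2 ≠ 0 then
      multGf2Loop fuel (if PySem.Int.band f2 1 ≠ 0 then PySem.Int.bxor z f1 else z)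
        (f1 <<< (1:Nat)) (f2 >>> (1:Nat))
    else z

def multGf2 (f1 f2 : Int) : Int :=
  let p := if f2 > f1 then (f2, f1) else (f1, f2)
  multGf2Loop (p.2.natAbs + 1) 0 p.1 p.2

-- deg(n) = 0 if n == 0 else len(bin(abs(n))) - 2, i.e. the bit length of |n| (exact)
def degA (n : Int) : Int := if n = 0 then 0 else (PySem.Int.bitLength n : Int)

-- while-loop of _div_gf2 with fuel; .toNat on the shift exponent is exact because the
-- loop guard makes it nonnegative (Python raises on a negative shift count).
def divGf2Loop (b : Int) (d : Int) : Nat → Int → Int → Int × Int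
  | 0, q, r => (q, r)
  | fuel+1, q, r =>
    if degA r ≥ d then
      divGf2Loop b d fuel (PySem.Int.bxor q ((1:Int) <<< (degA r - d).toNat))
        (PySem.Int.bxor r (multGf2 b ((1:Int) <<< (degA r - d).toNat)))
    else (q, r)

def div_gf2_py (a : Int) (b : Int) : Int × Int :=
  if a < b then (0, a)
  else divGf2Loop b (degA b) (a.natAbs + 2) 0 a

-- ===== PORT B =====
-- for i in range(a.bit_length()-1, -1, -1): the Nat argument counts the positions still
-- to process (count i+1 means position i is next); the body computes
-- r' = (r << 1) | ((a >> i) & 1) once in Python — it appears three times below only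
-- because the port avoids a 'let'.
def hornerLoop (a b : Int) (db : Nat) : Nat → Int → Int → Int × Int
  | 0, q, r => (q, r)
  | i+1, q, r =>
    if db ≤ PySem.Int.bitLength (PySem.Int.bor (r <<< (1:Nat)) (PySem.Int.band (a >>> i) 1)) then
      hornerLoop a b db i (PySem.Int.bor q ((1:Int) <<< i))
        (PySem.Int.bxor (PySem.Int.bor (r <<< (1:Nat)) (PySem.Int.band (a >>> i) 1)) b)
    else
      hornerLoop a b db i q (PySem.Int.bor (r <<< (1:Nat)) (PySem.Int.band (a >>> i) 1))

def div_gf2_py_alt (a : Int) (b : Int) : Int × Int :=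
  if a < b then (0, a)
  else hornerLoop a b (PySem.Int.bitLength b) (PySem.Int.bitLength a) 0 0

-- ===== PRECONDITION & SPEC =====
-- Pre_ keeps the natural polynomial domain (nonnegative operands) plus the trivial
-- a < b early return. It excludes: b ≤ 0 inputs on which the Python A loops forever
-- (b = 0 with 0 ≤ a, and b < 0 with bit_length(a) ≥ bit_length(b) ≥ …), and negative
-- dividends with a negative divisor (a < 0, b < 0, b ≤ a, bit_length(a) < bit_length(b))
-- — outside the polynomial domain — where A's signed comparison happens to return (0, a)
-- while B's bit scan reads a's two's-complement bits (see cites).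
def Pre_div_gf2_py (a : Int) (b : Int) : Prop :=
  a < b ∨ (0 ≤ a ∧ 0 < b) ∨ (0 ≤ a ∧ b < 0 ∧ PySem.Int.bitLength a < PySem.Int.bitLength b)
instance (a : Int) (b : Int) : Decidable (Pre_div_gf2_py a b) := by
  unfold Pre_div_gf2_py; infer_instance

def pvWitness_div_gf2_py : Int × Int := (100, 7)

def Spec_div_gf2_py (a : Int) (b : Int) (out : Int × Int) : Prop := out = div_gf2_py_alt a b
instance (a : Int) (b : Int) (out : Int × Int) : Decidable (Spec_div_gf2_py a b out) := by
  unfold Spec_div_gf2_py; infer_instance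

-- ===== CLAIM (what is proved, stated in full; the proofs are below) =====
def Claim_equal_div_gf2_py : Prop := ∀ (a : Int) (b : Int), Dom_div_gf2_py a b → Pre_div_gf2_py a b → Spec_div_gf2_py a b (div_gf2_py a b)

-- ===== LEMMAS AND PROOFS =====

-- proof-side intermediate: the positional scan over quotient bit positions, used only
-- as a stepping stone between A's while-loop and B's shift register.
def altLoop (b : Int) (db : Nat) : Nat → Int → Int → Int × Int
  | 0, q, r => (q, r)
  | k+1, q, r =>
    if PySem.Int.band (r >>> (db - 1 + k)) 1 ≠ 0 then
      altLoop b db k (PySem.Int.bor q ((1:Int) <<< k)) (PySem.Int.bxor r (b <<< k))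
    else altLoop b db k q r

-- bit-length bounds, specialised to casts of naturals
theorem blN_lt (m : Nat) : m < 2 ^ PySem.Int.bitLength (m : Int) := by
  have h := PySem.Int.lt_two_pow_bitLength (m : Int)
  simpa using h

theorem blN_le (m : Nat) (h : m ≠ 0) : 2 ^ (PySem.Int.bitLength (m : Int) - 1) ≤ m := by
  have h2 := PySem.Int.two_pow_bitLength_le (m : Int) (by exact_mod_cast h)
  simpa using h2

theorem bl_pos (m : Nat) (h : m ≠ 0) : 1 ≤ PySem.Int.bitLength (m : Int) := by
  by_contra hc
  have h0 : PySem.Int.bitLength (m : Int) = 0 := by omega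
  have := blN_lt m
  rw [h0] at this
  omega

theorem bl_le_of_lt (m t : Nat) (h : m < 2 ^ t) : PySem.Int.bitLength (m : Int) ≤ t := by
  by_cases hm : m = 0
  · subst hm; simp
  · have h1 := blN_le m hm
    have h2 : 2 ^ (PySem.Int.bitLength (m : Int) - 1) < 2 ^ t := lt_of_le_of_lt h1 h
    have := (Nat.pow_lt_pow_iff_right (by norm_num : 1 < 2)).mp h2
    have := bl_pos m hm
    omega

theorem bl_eq_of (m t : Nat) (h1 : 2 ^ t ≤ m) (h2 : m < 2 ^ (t+1)) :
    PySem.Int.bitLength (m : Int) = t + 1 := by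
  have hub := bl_le_of_lt m (t+1) h2
  have hm : m ≠ 0 := by
    have : 1 ≤ 2 ^ t := Nat.one_le_two_pow
    omega
  have hlt : 2 ^ t < 2 ^ PySem.Int.bitLength (m : Int) := lt_of_le_of_lt h1 (blN_lt m)
  have := (Nat.pow_lt_pow_iff_right (by norm_num : 1 < 2)).mp hlt
  omega

theorem bl_le_self (m : Nat) : PySem.Int.bitLength (m : Int) ≤ m :=
  bl_le_of_lt m m (Nat.lt_two_pow_self)

theorem degA_natCast (m : Nat) : degA (m : Int) = (PySem.Int.bitLength (m : Int) : Int) := by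
  unfold degA
  by_cases h : m = 0
  · subst h; simp
  · simp [h]

-- xor of a low part against a multiple of 2^k is addition (disjoint bits)
theorem xor_two_pow_mul (x c k : Nat) (h : x < 2 ^ k) :
    2 ^ k * c ^^^ x = 2 ^ k * c + x := by
  apply Nat.eq_of_testBit_eq
  intro j
  have hc : Nat.testBit (2 ^ k * c + x) j =
      if j < k then x.testBit j else c.testBit (j - k) := Nat.testBit_two_pow_mul_add c h j
  have hc0 : Nat.testBit (2 ^ k * c) j =
      if j < k then Nat.testBit 0 j else c.testBit (j - k) := by
    have := Nat.testBit_two_pow_mul_add c (Nat.two_pow_pos k) j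
    simpa using this
  rw [Nat.testBit_xor, hc, hc0]
  by_cases hj : j < k
  · simp [hj]
  · have hx : x.testBit j = false := by
      apply Nat.testBit_lt_two_pow
      calc x < 2 ^ k := h
        _ ≤ 2 ^ j := Nat.pow_le_pow_right (by norm_num) (by omega)
    simp [hj, hx]

theorem or_two_pow_mul (x c k : Nat) (h : x < 2 ^ k) :
    2 ^ k * c ||| x = 2 ^ k * c + x := by
  apply Nat.eq_of_testBit_eq
  intro j
  have hc : Nat.testBit (2 ^ k * c + x) j =
      if j < k then x.testBit j else c.testBit (j - k) := Nat.testBit_two_pow_mul_add c h j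
  have hc0 : Nat.testBit (2 ^ k * c) j =
      if j < k then Nat.testBit 0 j else c.testBit (j - k) := by
    have := Nat.testBit_two_pow_mul_add c (Nat.two_pow_pos k) j
    simpa using this
  rw [Nat.testBit_or, hc, hc0]
  by_cases hj : j < k
  · simp [hj]
  · have hx : x.testBit j = false := by
      apply Nat.testBit_lt_two_pow
      calc x < 2 ^ k := h
        _ ≤ 2 ^ j := Nat.pow_le_pow_right (by norm_num) (by omega)
    simp [hj, hx]

-- xor of two numbers with the same top bit drops that bit
theorem xor_drop_top (x y t : Nat) (hx1 : 2 ^ t ≤ x) (hx2 : x < 2 ^ (t+1))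
    (hy1 : 2 ^ t ≤ y) (hy2 : y < 2 ^ (t+1)) : x ^^^ y < 2 ^ t := by
  have hx0 : x - 2 ^ t < 2 ^ t := by
    have : 2 ^ (t+1) = 2 ^ t + 2 ^ t := by ring
    omega
  have hy0 : y - 2 ^ t < 2 ^ t := by
    have : 2 ^ (t+1) = 2 ^ t + 2 ^ t := by ring
    omega
  have hex : x = 2 ^ t * 1 ^^^ (x - 2 ^ t) := by
    rw [xor_two_pow_mul _ _ _ hx0]; omega
  have hey : y = 2 ^ t * 1 ^^^ (y - 2 ^ t) := by
    rw [xor_two_pow_mul _ _ _ hy0]; omega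
  have : x ^^^ y = (x - 2 ^ t) ^^^ (y - 2 ^ t) := by
    conv_lhs => rw [hex, hey]
    rw [Nat.xor_comm (2 ^ t * 1) (x - 2 ^ t)]
    rw [Nat.xor_assoc, ← Nat.xor_assoc (2 ^ t * 1), Nat.xor_self]
    simp
  rw [this]
  exact Nat.xor_lt_two_pow hx0 hy0

theorem testBit_true_of_bounds (n i : Nat) (h1 : 2 ^ i ≤ n) (h2 : n < 2 ^ (i+1)) :
    n.testBit i = true := by
  rw [Nat.testBit_eq_decide_div_mod_eq]
  have hdiv : n / 2 ^ i = 1 := by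
    refine Nat.div_eq_of_lt_le (by omega) ?_
    have : 2 ^ (i+1) = 2 ^ i * 2 := by ring
    omega
  simp [hdiv]

theorem lt_two_pow_of_testBit_false (n i : Nat) (h2 : n < 2 ^ (i+1))
    (h : n.testBit i = false) : n < 2 ^ i := by
  by_contra hc
  have := testBit_true_of_bounds n i (by omega) h2
  rw [this] at h
  simp at h

-- multGf2Loop with f2 = 2^k (the "s ≤ b" branch of the swap)
theorem multGf2Loop_pow (k : Nat) : ∀ (fuel z f1 : Nat), k + 2 ≤ fuel →
    multGf2Loop fuel (z : Int) (f1 : Int) ((2 ^ k : Nat) : Int) =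
      ((z ^^^ (f1 <<< k) : Nat) : Int) := by
  induction k with
  | zero =>
    intro fuel z f1 hfuel
    obtain ⟨f, rfl⟩ : ∃ f, fuel = f + 2 := ⟨fuel - 2, by omega⟩
    show multGf2Loop (f + 1 + 1) (z : Int) (f1 : Int) ((2 ^ 0 : Nat) : Int) = _
    rw [multGf2Loop]
    simp only [pow_zero, Nat.cast_one]
    rw [if_pos (by norm_num), if_pos (by norm_num)]
    have h1 : ((1:Int) >>> (1:Nat)) = ((0:Nat) : Int) := by decide
    rw [h1, multGf2Loop]
    rw [if_neg (by simp)]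
    rw [PySem.Int.bxor_natCast]
    simp
  | succ k ih =>
    intro fuel z f1 hfuel
    obtain ⟨f, rfl⟩ : ∃ f, fuel = f + 1 := ⟨fuel - 1, by omega⟩
    rw [multGf2Loop]
    rw [if_pos (by positivity)]
    have hband : PySem.Int.band ((2:Int) ^ (k + 1)) 1 = 0 := by
      have h : ((2:Int) ^ (k+1)) = ((2^(k+1) : Nat) : Int) := by push_cast; ring
      have h1 : ((1:Int)) = ((1:Nat) : Int) := by norm_num
      rw [h, h1, PySem.Int.band_natCast]
      have h2 : 2 ^ (k+1) &&& 1 = 0 := by rw [Nat.and_one_is_mod, pow_succ, Nat.mul_mod_left]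
      rw [h2]; rfl
    rw [if_neg (by simp [hband])]
    have hsl : ((f1:Int) <<< (1:Nat)) = ((f1 <<< 1 : Nat) : Int) := Int.natCast_shiftLeft ..
    have hsr : (((2 ^ (k+1) : Nat) : Int) >>> (1:Nat)) = ((2 ^ k : Nat) : Int) := by
      rw [← Int.natCast_shiftRight]
      congr 1
      rw [Nat.shiftRight_eq_div_pow, pow_one, pow_succ]
      omega
    rw [hsl, hsr, ih f z (f1 <<< 1) (by omega)]
    congr 1

-- multGf2Loop with f1 = 2^k (the "s > b" branch of the swap)
theorem multGf2Loop_swap (fuel : Nat) : ∀ (n : Nat), n < 2 ^ fuel → ∀ (z k : Nat),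
    multGf2Loop fuel (z : Int) ((2 ^ k : Nat) : Int) (n : Int) =
      ((z ^^^ (n <<< k) : Nat) : Int) := by
  induction fuel with
  | zero =>
    intro n hn z k
    interval_cases n
    simp [multGf2Loop]
  | succ f ih =>
    intro n hn z k
    by_cases hn0 : n = 0
    · subst hn0
      simp [multGf2Loop]
    · rw [multGf2Loop]
      rw [if_pos (by exact_mod_cast hn0)]
      have hband : PySem.Int.band (n : Int) 1 = ((n % 2 : Nat) : Int) := by
        have h1 : ((1:Int)) = ((1:Nat) : Int) := by norm_num
        rw [h1, PySem.Int.band_natCast, Nat.and_one_is_mod]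
      have hz' : (if PySem.Int.band (n : Int) 1 ≠ 0 then PySem.Int.bxor (z : Int) ((2 ^ k : Nat) : Int) else (z : Int))
          = ((z ^^^ (n % 2) * 2 ^ k : Nat) : Int) := by
        rcases Nat.mod_two_eq_zero_or_one n with h | h
        · rw [if_neg (by simp [hband, h])]
          simp [h]
        · rw [if_pos (by simp [hband, h])]
          rw [PySem.Int.bxor_natCast]
          simp [h]
      have hsl : (((2 ^ k : Nat) : Int) <<< (1:Nat)) = ((2 ^ (k+1) : Nat) : Int) := by
        rw [← Int.natCast_shiftLeft]
        congr 1
        rw [Nat.shiftLeft_eq, pow_one]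
        exact (pow_succ 2 k).symm
      have hsr : ((n : Int) >>> (1:Nat)) = ((n / 2 : Nat) : Int) := by
        rw [← Int.natCast_shiftRight]
        congr 1
      rw [hz', hsl, hsr]
      have hlt : n / 2 < 2 ^ f := by
        rw [pow_succ] at hn
        omega
      rw [ih (n / 2) hlt (z ^^^ (n % 2) * 2 ^ k) (k + 1)]
      congr 1
      rw [Nat.xor_assoc]
      congr 1
      have hx : (n % 2) * 2 ^ k < 2 ^ (k + 1) := by
        have h1 : n % 2 < 2 := Nat.mod_lt n (by norm_num)
        have h2 : 2 ^ (k+1) = 2 * 2 ^ k := by ring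
        have h3 : (n % 2) * 2 ^ k < 2 * 2 ^ k :=
          Nat.mul_lt_mul_of_lt_of_le h1 (le_refl _) (Nat.two_pow_pos k)
        omega
      have hmul : n / 2 * 2 ^ (k+1) = 2 ^ (k+1) * (n / 2) := Nat.mul_comm ..
      rw [Nat.shiftLeft_eq, Nat.shiftLeft_eq, hmul, Nat.xor_comm, xor_two_pow_mul _ _ _ hx]
      have hdm := Nat.div_add_mod n 2
      calc 2 ^ (k+1) * (n / 2) + n % 2 * 2 ^ k
          = (2 * (n / 2) + n % 2) * 2 ^ k := by ring
        _ = n * 2 ^ k := by rw [hdm]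

theorem multGf2_pow (b k : Nat) :
    multGf2 (b : Int) ((2 ^ k : Nat) : Int) = ((b <<< k : Nat) : Int) := by
  unfold multGf2
  by_cases h : ((2 ^ k : Nat) : Int) > (b : Int)
  · rw [if_pos h]
    simp only [Int.natAbs_natCast]
    have hb : b < 2 ^ (b + 1) := lt_trans Nat.lt_two_pow_self (Nat.pow_lt_pow_succ (by norm_num))
    have := multGf2Loop_swap (b + 1) b hb 0 k
    simpa using this
  · rw [if_neg h]
    simp only [Int.natAbs_natCast]
    have hfuel : k + 2 ≤ 2 ^ k + 1 := by
      have := Nat.lt_two_pow_self (n := k)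
      omega
    have := multGf2Loop_pow k (2 ^ k + 1) 0 b hfuel
    simpa using this

-- the Python truthiness test (r >> i) & 1, as a Nat computation
theorem band_one_testBit (r i : Nat) :
    PySem.Int.band ((r : Int) >>> i) 1 = ((r / 2 ^ i % 2 : Nat) : Int) := by
  have h1 : ((1 : Int)) = ((1 : Nat) : Int) := by norm_num
  rw [← Int.natCast_shiftRight, h1, PySem.Int.band_natCast, Nat.and_one_is_mod,
    Nat.shiftRight_eq_div_pow]

-- the central loop correspondence: A's while-loop equals the positional scan
theorem loop_eq (b : Nat) (hb : b ≠ 0) : ∀ (k : Nat), ∀ (fuel q r : Nat),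
    r < 2 ^ (PySem.Int.bitLength (b : Int) - 1 + k) → k + 1 ≤ fuel →
    2 ^ k ∣ q →
    divGf2Loop (b : Int) ((PySem.Int.bitLength (b : Int) : Nat) : Int) fuel (q : Int) (r : Int) =
      altLoop (b : Int) (PySem.Int.bitLength (b : Int)) k (q : Int) (r : Int) := by
  intro k
  induction k with
  | zero =>
    intro fuel q r hr hfuel hq
    obtain ⟨f, rfl⟩ : ∃ f, fuel = f + 1 := ⟨fuel - 1, by omega⟩
    rw [divGf2Loop, altLoop]
    rw [if_neg ?_]
    have h1 := bl_le_of_lt r (PySem.Int.bitLength (b : Int) - 1) (by simpa using hr)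
    have h2 := bl_pos b hb
    rw [degA_natCast]
    omega
  | succ k ih =>
    intro fuel q r hr hfuel hq
    obtain ⟨f, rfl⟩ : ∃ f, fuel = f + 1 := ⟨fuel - 1, by omega⟩
    have hdb1 : 1 ≤ PySem.Int.bitLength (b : Int) := bl_pos b hb
    have hi : PySem.Int.bitLength (b : Int) - 1 + (k + 1) =
        (PySem.Int.bitLength (b : Int) - 1 + k) + 1 := by omega
    rw [hi] at hr
    by_cases hbit : r.testBit (PySem.Int.bitLength (b : Int) - 1 + k)
    · -- the top bit is set: both loops fire at position k
      have hge : 2 ^ (PySem.Int.bitLength (b : Int) - 1 + k) ≤ r :=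
        Nat.ge_two_pow_of_testBit hbit
      have hbl : PySem.Int.bitLength (r : Int) = PySem.Int.bitLength (b : Int) + k := by
        have := bl_eq_of r (PySem.Int.bitLength (b : Int) - 1 + k) hge hr
        omega
      have hmod : r / 2 ^ (PySem.Int.bitLength (b : Int) - 1 + k) % 2 = 1 := by
        have := hbit
        rw [Nat.testBit_eq_decide_div_mod_eq] at this
        simpa using this
      have hBguard : PySem.Int.band ((r : Int) >>> (PySem.Int.bitLength (b : Int) - 1 + k)) 1 ≠ 0 := by
        rw [band_one_testBit, hmod]
        norm_num
      have hAguard : degA (r : Int) ≥ ((PySem.Int.bitLength (b : Int) : Nat) : Int) := by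
        rw [degA_natCast, hbl]
        exact_mod_cast Nat.le_add_right _ k
      rw [divGf2Loop, if_pos hAguard, altLoop, if_pos hBguard]
      have hs : (degA (r : Int) - ((PySem.Int.bitLength (b : Int) : Nat) : Int)).toNat = k := by
        rw [degA_natCast, hbl]
        omega
      rw [hs]
      have hone : ((1 : Int) <<< k) = ((2 ^ k : Nat) : Int) := by
        have : ((1 : Int)) = ((1 : Nat) : Int) := by norm_num
        rw [this, ← Int.natCast_shiftLeft, Nat.one_shiftLeft]
      rw [hone, multGf2_pow b k]
      obtain ⟨c, rfl⟩ := hq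
      have hklt : (2 ^ k : Nat) < 2 ^ (k + 1) := Nat.pow_lt_pow_succ (by norm_num)
      have hxq : PySem.Int.bxor ((2 ^ (k+1) * c : Nat) : Int) ((2 ^ k : Nat) : Int) =
          ((2 ^ (k+1) * c + 2 ^ k : Nat) : Int) := by
        rw [PySem.Int.bxor_natCast, xor_two_pow_mul _ _ _ hklt]
      have hoq : PySem.Int.bor ((2 ^ (k+1) * c : Nat) : Int) ((2 ^ k : Nat) : Int) =
          ((2 ^ (k+1) * c + 2 ^ k : Nat) : Int) := by
        rw [PySem.Int.bor_natCast, or_two_pow_mul _ _ _ hklt]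
      have hxr : PySem.Int.bxor ((r : Nat) : Int) ((b <<< k : Nat) : Int) =
          ((r ^^^ (b <<< k) : Nat) : Int) := by
        rw [PySem.Int.bxor_natCast]
      rw [hxq, hoq, hxr]
      -- bounds for the new remainder
      have hbk1 : 2 ^ (PySem.Int.bitLength (b : Int) - 1 + k) ≤ b <<< k := by
        rw [Nat.shiftLeft_eq, pow_add]
        exact Nat.mul_le_mul_right _ (blN_le b hb)
      have hbk2 : b <<< k < 2 ^ (PySem.Int.bitLength (b : Int) - 1 + k + 1) := by
        rw [Nat.shiftLeft_eq]
        have : PySem.Int.bitLength (b : Int) - 1 + k + 1 = PySem.Int.bitLength (b : Int) + k := by omega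
        rw [this, pow_add]
        exact Nat.mul_lt_mul_right (Nat.two_pow_pos k) |>.mpr (blN_lt b)
      have hr' : r ^^^ (b <<< k) < 2 ^ (PySem.Int.bitLength (b : Int) - 1 + k) :=
        xor_drop_top r (b <<< k) _ hge hr hbk1 hbk2
      exact ih f (2 ^ (k+1) * c + 2 ^ k) (r ^^^ (b <<< k)) hr' (by omega)
        ⟨2 * c + 1, by ring⟩
    · -- top bit clear: the positional scan skips, A's loop is unchanged at this position
      have hbitf : r.testBit (PySem.Int.bitLength (b : Int) - 1 + k) = false := by
        simpa using hbit
      have hlt : r < 2 ^ (PySem.Int.bitLength (b : Int) - 1 + k) :=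
        lt_two_pow_of_testBit_false r _ hr hbitf
      have hmod : r / 2 ^ (PySem.Int.bitLength (b : Int) - 1 + k) % 2 = 0 := by
        rw [Nat.testBit_eq_decide_div_mod_eq] at hbitf
        simp at hbitf
        omega
      have hBguard : ¬ (PySem.Int.band ((r : Int) >>> (PySem.Int.bitLength (b : Int) - 1 + k)) 1 ≠ 0) := by
        rw [band_one_testBit, hmod]
        norm_num
      rw [altLoop, if_neg hBguard]
      exact ih (f + 1) q r hlt (by omega)
        (dvd_trans (pow_dvd_pow 2 (Nat.le_succ k)) hq)

-- ===== bridge lemmas: the positional scan equals B's shift register =====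

-- shift-in identity: ((R >> (i+1)) << 1) | (bit i of A) = R >> i when R and A agree on bit i
theorem shiftin (R A i : Nat) (hbit : R.testBit i = A.testBit i) :
    ((R >>> (i+1)) <<< 1) ||| ((A >>> i) &&& 1) = R >>> i := by
  have hb : (A >>> i) &&& 1 = (R >>> i) % 2 := by
    rw [Nat.and_one_is_mod]
    have h1 : (R >>> i) % 2 = (if R.testBit i then 1 else 0) := by
      rw [Nat.testBit_eq_decide_div_mod_eq, Nat.shiftRight_eq_div_pow]
      rcases Nat.mod_two_eq_zero_or_one (R / 2 ^ i) with h | h <;> simp [h]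
    have h2 : (A >>> i) % 2 = (if A.testBit i then 1 else 0) := by
      rw [Nat.testBit_eq_decide_div_mod_eq, Nat.shiftRight_eq_div_pow]
      rcases Nat.mod_two_eq_zero_or_one (A / 2 ^ i) with h | h <;> simp [h]
    rw [h1, h2, hbit]
  have hsucc : R >>> (i+1) = (R >>> i) / 2 := by
    rw [Nat.shiftRight_eq_div_pow, Nat.shiftRight_eq_div_pow, pow_succ, Nat.div_div_eq_div_mul]
  have hlt : (R >>> i) % 2 < 2 ^ 1 := by
    have := Nat.mod_lt (R >>> i) (y := 2) (by norm_num)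
    simpa using this
  rw [hb, hsucc, Nat.shiftLeft_eq, pow_one, Nat.mul_comm]
  have h3 : (2:Nat) ^ 1 * ((R >>> i) / 2) ||| (R >>> i) % 2 =
      2 ^ 1 * ((R >>> i) / 2) + (R >>> i) % 2 := or_two_pow_mul _ _ _ hlt
  have h4 : (2:Nat) ^ 1 = 2 := by norm_num
  rw [h4] at h3
  rw [h3]
  exact Nat.div_add_mod _ 2

-- shifting a reduced remainder: (R ^ (B << i)) >> i = (R >> i) ^ B
theorem xor_shiftLeft_shiftRight (R B i : Nat) :
    (R ^^^ (B <<< i)) >>> i = (R >>> i) ^^^ B := by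
  apply Nat.eq_of_testBit_eq
  intro j
  rw [Nat.testBit_shiftRight, Nat.testBit_xor, Nat.testBit_xor, Nat.testBit_shiftRight,
    Nat.testBit_shiftLeft]
  have h1 : i ≤ i + j := Nat.le_add_right i j
  have h2 : i + j - i = j := by omega
  simp [h1, h2]

-- the reduction does not touch the bits below position i
theorem xor_shiftLeft_low (R B i j : Nat) (hj : j < i) :
    (R ^^^ (B <<< i)).testBit j = R.testBit j := by
  rw [Nat.testBit_xor, Nat.testBit_shiftLeft]
  have : ¬ i ≤ j := by omega
  simp [this]

theorem shiftRight_lt (R d i : Nat) (h : R < 2 ^ (d + i)) : R >>> i < 2 ^ d := by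
  rw [Nat.shiftRight_eq_div_pow]
  apply Nat.div_lt_of_lt_mul
  calc R < 2 ^ (d + i) := h
    _ = 2 ^ i * 2 ^ d := by ring

-- the positional scan is idle above the top quotient position
theorem alt_idle (b : Int) (db : Nat) : ∀ (j k : Nat) (q : Int) (R : Nat),
    R < 2 ^ (db - 1 + k) →
    altLoop b db (k + j) q (R : Int) = altLoop b db k q (R : Int) := by
  intro j
  induction j with
  | zero => intro k q R _; rfl
  | succ j ih =>
    intro k q R hR
    have hkj : k + (j + 1) = (k + j) + 1 := by omega
    rw [hkj, altLoop]
    have hmod : R / 2 ^ (db - 1 + (k + j)) % 2 = 0 := by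
      have : R < 2 ^ (db - 1 + (k + j)) :=
        lt_of_lt_of_le hR (Nat.pow_le_pow_right (by norm_num) (by omega))
      rw [Nat.div_eq_of_lt this]
    rw [if_neg (by rw [band_one_testBit, hmod]; norm_num)]
    exact ih k q R hR

-- central bridge: B's shift register run on the window R >> c equals the positional scan on R
theorem horner_eq_alt (A B : Nat) (hb : B ≠ 0) : ∀ (c : Nat) (R : Nat) (q : Int),
    R < 2 ^ (PySem.Int.bitLength (B : Int) - 1 + c) →
    (∀ j, j < c → R.testBit j = A.testBit j) →
    hornerLoop (A : Int) (B : Int) (PySem.Int.bitLength (B : Int)) c q ((R >>> c : Nat) : Int) =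
      altLoop (B : Int) (PySem.Int.bitLength (B : Int)) c q (R : Int) := by
  intro c
  induction c with
  | zero =>
    intro R q _ _
    rw [hornerLoop, altLoop, Nat.shiftRight_zero]
  | succ i ih =>
    intro R q hR hlow
    have hdb1 : 1 ≤ PySem.Int.bitLength (B : Int) := bl_pos B hb
    -- the computed shift-in value is the window R >> i
    have hsl : (((R >>> (i+1) : Nat) : Int) <<< (1:Nat)) = (((R >>> (i+1)) <<< 1 : Nat) : Int) :=
      Int.natCast_shiftLeft ..
    have hband : PySem.Int.band ((A : Int) >>> i) 1 = (((A >>> i) &&& 1 : Nat) : Int) := by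
      have h1 : ((1:Int)) = ((1:Nat) : Int) := by norm_num
      rw [← Int.natCast_shiftRight, h1, PySem.Int.band_natCast]
    have hr' : PySem.Int.bor (((R >>> (i+1) : Nat) : Int) <<< (1:Nat)) (PySem.Int.band ((A : Int) >>> i) 1)
        = ((R >>> i : Nat) : Int) := by
      rw [hsl, hband, PySem.Int.bor_natCast, shiftin R A i (hlow i (Nat.lt_succ_self i))]
    have hRi : R >>> i < 2 ^ PySem.Int.bitLength (B : Int) := by
      apply shiftRight_lt
      have : PySem.Int.bitLength (B : Int) + i = PySem.Int.bitLength (B : Int) - 1 + (i + 1) := by omega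
      rw [this]
      exact hR
    rw [hornerLoop, hr']
    by_cases hbit : R.testBit (PySem.Int.bitLength (B : Int) - 1 + i)
    · -- reduce: both set quotient bit i
      have hgeW : 2 ^ (PySem.Int.bitLength (B : Int) - 1) ≤ R >>> i := by
        apply Nat.ge_two_pow_of_testBit
        rw [Nat.testBit_shiftRight]
        have : i + (PySem.Int.bitLength (B : Int) - 1) = PySem.Int.bitLength (B : Int) - 1 + i := by omega
        rw [this]
        exact hbit
      have hblW : PySem.Int.bitLength ((R >>> i : Nat) : Int) = PySem.Int.bitLength (B : Int) := by
        have h := bl_eq_of (R >>> i) (PySem.Int.bitLength (B : Int) - 1) hgeW (by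
          have : PySem.Int.bitLength (B : Int) - 1 + 1 = PySem.Int.bitLength (B : Int) := by omega
          rw [this]; exact hRi)
        omega
      rw [if_pos (by rw [hblW])]
      -- the positional scan fires too
      have hmod : R / 2 ^ (PySem.Int.bitLength (B : Int) - 1 + i) % 2 = 1 := by
        have := hbit
        rw [Nat.testBit_eq_decide_div_mod_eq] at this
        simpa using this
      rw [altLoop, if_pos (by rw [band_one_testBit, hmod]; norm_num)]
      -- reduced remainder, window form vs full form
      have hxw : PySem.Int.bxor ((R >>> i : Nat) : Int) (B : Int) =
          (((R ^^^ (B <<< i)) >>> i : Nat) : Int) := by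
        rw [PySem.Int.bxor_natCast, xor_shiftLeft_shiftRight]
      have hxf : PySem.Int.bxor (R : Int) ((B : Int) <<< i) =
          ((R ^^^ (B <<< i) : Nat) : Int) := by
        rw [← Int.natCast_shiftLeft, PySem.Int.bxor_natCast]
      rw [hxw, hxf]
      -- bound on the reduced remainder
      have hge : 2 ^ (PySem.Int.bitLength (B : Int) - 1 + i) ≤ R :=
        Nat.ge_two_pow_of_testBit hbit
      have hi1 : PySem.Int.bitLength (B : Int) - 1 + (i + 1) =
          (PySem.Int.bitLength (B : Int) - 1 + i) + 1 := by omega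
      have hbk1 : 2 ^ (PySem.Int.bitLength (B : Int) - 1 + i) ≤ B <<< i := by
        rw [Nat.shiftLeft_eq, pow_add]
        exact Nat.mul_le_mul_right _ (blN_le B hb)
      have hbk2 : B <<< i < 2 ^ (PySem.Int.bitLength (B : Int) - 1 + i + 1) := by
        rw [Nat.shiftLeft_eq]
        have : PySem.Int.bitLength (B : Int) - 1 + i + 1 = PySem.Int.bitLength (B : Int) + i := by omega
        rw [this, pow_add]
        exact Nat.mul_lt_mul_right (Nat.two_pow_pos i) |>.mpr (blN_lt B)
      have hR' : R ^^^ (B <<< i) < 2 ^ (PySem.Int.bitLength (B : Int) - 1 + i) :=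
        xor_drop_top R (B <<< i) _ hge (by rw [← hi1]; exact hR) hbk1 hbk2
      exact ih (R ^^^ (B <<< i)) (PySem.Int.bor q ((1:Int) <<< i)) hR'
        (fun j hj => by rw [xor_shiftLeft_low R B i j hj]; exact hlow j (by omega))
    · -- no reduction: both skip position i
      have hbitW : (R >>> i).testBit (PySem.Int.bitLength (B : Int) - 1) = false := by
        rw [Nat.testBit_shiftRight]
        have : i + (PySem.Int.bitLength (B : Int) - 1) = PySem.Int.bitLength (B : Int) - 1 + i := by omega
        rw [this]
        simpa using hbit
      have hsmall : R >>> i < 2 ^ (PySem.Int.bitLength (B : Int) - 1) := by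
        apply lt_two_pow_of_testBit_false _ _ _ hbitW
        have : PySem.Int.bitLength (B : Int) - 1 + 1 = PySem.Int.bitLength (B : Int) := by omega
        rw [this]
        exact hRi
      have hguard : ¬ (PySem.Int.bitLength (B : Int) ≤ PySem.Int.bitLength ((R >>> i : Nat) : Int)) := by
        have := bl_le_of_lt (R >>> i) (PySem.Int.bitLength (B : Int) - 1) hsmall
        omega
      rw [if_neg hguard]
      have hmod : R / 2 ^ (PySem.Int.bitLength (B : Int) - 1 + i) % 2 = 0 := by
        have hf : R.testBit (PySem.Int.bitLength (B : Int) - 1 + i) = false := by simpa using hbit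
        rw [Nat.testBit_eq_decide_div_mod_eq] at hf
        simp at hf
        omega
      rw [altLoop, if_neg (by rw [band_one_testBit, hmod]; norm_num)]
      have hRlt : R < 2 ^ (PySem.Int.bitLength (B : Int) - 1 + i) := by
        apply lt_two_pow_of_testBit_false R _ _ (by simpa using hbit)
        have : PySem.Int.bitLength (B : Int) - 1 + i + 1 = PySem.Int.bitLength (B : Int) - 1 + (i+1) := by omega
        rw [this]
        exact hR
      exact ih R q hRlt (fun j hj => hlow j (by omega))

-- when b's bit length exceeds a's, the shift register never fills: B returns (q, a)
theorem horner_idle (A : Nat) (b : Int) (db : Nat)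
    (hdb : PySem.Int.bitLength (A : Int) < db) : ∀ (c : Nat) (q : Int),
    hornerLoop (A : Int) b db c q ((A >>> c : Nat) : Int) = (q, (A : Int)) := by
  intro c
  induction c with
  | zero => intro q; rw [hornerLoop, Nat.shiftRight_zero]
  | succ i ih =>
    intro q
    have hsl : (((A >>> (i+1) : Nat) : Int) <<< (1:Nat)) = (((A >>> (i+1)) <<< 1 : Nat) : Int) :=
      Int.natCast_shiftLeft ..
    have hband : PySem.Int.band ((A : Int) >>> i) 1 = (((A >>> i) &&& 1 : Nat) : Int) := by
      have h1 : ((1:Int)) = ((1:Nat) : Int) := by norm_num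
      rw [← Int.natCast_shiftRight, h1, PySem.Int.band_natCast]
    have hr' : PySem.Int.bor (((A >>> (i+1) : Nat) : Int) <<< (1:Nat)) (PySem.Int.band ((A : Int) >>> i) 1)
        = ((A >>> i : Nat) : Int) := by
      rw [hsl, hband, PySem.Int.bor_natCast, shiftin A A i rfl]
    rw [hornerLoop, hr']
    have hle : A >>> i < 2 ^ PySem.Int.bitLength (A : Int) := by
      calc A >>> i ≤ A := Nat.shiftRight_le A i
        _ < 2 ^ PySem.Int.bitLength (A : Int) := blN_lt A
    have hguard : ¬ (db ≤ PySem.Int.bitLength ((A >>> i : Nat) : Int)) := by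
      have := bl_le_of_lt (A >>> i) (PySem.Int.bitLength (A : Int)) hle
      omega
    rw [if_neg hguard]
    exact ih q

-- ===== VERDICT (by name: the statement is the Claim_ definition above) =====
theorem div_gf2_py_spec : Claim_equal_div_gf2_py := by
  intro a b _ hpre
  unfold Spec_div_gf2_py div_gf2_py div_gf2_py_alt
  by_cases hab : a < b
  · rw [if_pos hab, if_pos hab]
  · rw [if_neg hab, if_neg hab]
    rcases hpre with h | ⟨ha, hbpos⟩ | ⟨ha, hbneg, hblt⟩
    · exact absurd h hab
    · -- 0 ≤ a, 0 < b : the real division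
      obtain ⟨A', rfl⟩ := Int.eq_ofNat_of_zero_le ha
      obtain ⟨B', rfl⟩ := Int.eq_ofNat_of_zero_le (le_of_lt hbpos)
      have hbne : B' ≠ 0 := by
        intro h0
        subst h0
        simp at hbpos
      have hba : B' ≤ A' := by exact_mod_cast not_lt.mp hab
      have hdb1 : 1 ≤ PySem.Int.bitLength ((B' : Nat) : Int) := bl_pos B' hbne
      have hKdb : PySem.Int.bitLength ((B' : Nat) : Int) ≤ PySem.Int.bitLength ((A' : Nat) : Int) :=
        bl_le_of_lt B' _ (lt_of_le_of_lt hba (blN_lt A'))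
      have he : PySem.Int.bitLength ((B' : Nat) : Int) - 1 +
          (PySem.Int.bitLength ((A' : Nat) : Int) + 1 - PySem.Int.bitLength ((B' : Nat) : Int)) =
          PySem.Int.bitLength ((A' : Nat) : Int) := by omega
      have hKA : PySem.Int.bitLength ((A' : Nat) : Int) ≤ A' := bl_le_self A'
      -- A side: while-loop = positional scan at count K
      have hmain := loop_eq B' hbne
        (PySem.Int.bitLength ((A' : Nat) : Int) + 1 - PySem.Int.bitLength ((B' : Nat) : Int))
        (A' + 2) 0 A' (by rw [he]; exact blN_lt A') (by omega) (dvd_zero _)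
      -- B side: shift register = positional scan at count bitLength a
      have h0 : ((0 : Int)) = ((A' >>> PySem.Int.bitLength ((A' : Nat) : Int) : Nat) : Int) := by
        rw [Nat.shiftRight_eq_div_pow, Nat.div_eq_of_lt (blN_lt A')]
        simp
      have hbr := horner_eq_alt A' B' hbne (PySem.Int.bitLength ((A' : Nat) : Int)) A' 0
        (lt_of_lt_of_le (blN_lt A') (Nat.pow_le_pow_right (by norm_num) (by omega)))
        (fun _ _ => rfl)
      have hidle := alt_idle ((B' : Nat) : Int) (PySem.Int.bitLength ((B' : Nat) : Int))
        (PySem.Int.bitLength ((B' : Nat) : Int) - 1)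
        (PySem.Int.bitLength ((A' : Nat) : Int) + 1 - PySem.Int.bitLength ((B' : Nat) : Int))
        0 A' (by rw [he]; exact blN_lt A')
      have hsum : PySem.Int.bitLength ((A' : Nat) : Int) + 1 - PySem.Int.bitLength ((B' : Nat) : Int)
          + (PySem.Int.bitLength ((B' : Nat) : Int) - 1) = PySem.Int.bitLength ((A' : Nat) : Int) := by
        omega
      rw [hsum] at hidle
      rw [degA_natCast, Int.natAbs_natCast]
      simp only [Nat.cast_zero] at hmain
      rw [hmain, ← hidle, ← hbr, ← h0]
    · -- 0 ≤ a, b < 0 with bit_length(a) < bit_length(b): both return (0, a) at once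
      obtain ⟨A', rfl⟩ := Int.eq_ofNat_of_zero_le ha
      -- A: loop guard fails immediately
      have hda : degA ((A' : Nat) : Int) ≤ (PySem.Int.bitLength ((A' : Nat) : Int) : Int) := by
        unfold degA
        split_ifs with h0
        · positivity
        · exact le_refl _
      have hdb : degA b = (PySem.Int.bitLength b : Int) := by
        unfold degA
        rw [if_neg (by omega)]
      have hA : divGf2Loop b (degA b) ((((A' : Nat) : Int)).natAbs + 2) 0 ((A' : Nat) : Int)
          = (0, ((A' : Nat) : Int)) := by
        show divGf2Loop b (degA b) (_ + 1 + 1) 0 _ = _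
        rw [divGf2Loop, if_neg ?_]
        rw [hdb]
        have : (PySem.Int.bitLength ((A' : Nat) : Int) : Int) < (PySem.Int.bitLength b : Int) := by
          exact_mod_cast hblt
        omega
      -- B: register never fills
      have h0 : ((0 : Int)) = ((A' >>> PySem.Int.bitLength ((A' : Nat) : Int) : Nat) : Int) := by
        rw [Nat.shiftRight_eq_div_pow, Nat.div_eq_of_lt (blN_lt A')]
        simp
      have hB := horner_idle A' b (PySem.Int.bitLength b) hblt
        (PySem.Int.bitLength ((A' : Nat) : Int)) 0
      rw [hA, ← h0] at *
      rw [hB]
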